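-- pv_equiv track=rewrite | github.com/saisanthosh111/IRPROJECTS | Spell-20-053-jaysa/Spellchecker.py | vowelinsertion
-- ===== SOURCE A (Python) =====
-- from itertools import product
--
-- def vowelinsertion(word):
--     vowels = ["a","e","i","o","u"]
--     word = list(word)
--     for idx, l in enumerate(word):
--         if type(l) == list:
--             pass
--         elif l in vowels:
--             word[idx] = list(vowels)
--     for p in product(*word):
--             yield ''.join(p)
-- ===== SOURCE B (Python) =====
-- def vowelinsertion(word):
--     vowels = "aeiou"
--     out = list(word)
--     pos = [i for i, c in enumerate(out) if c in vowels]
--     for i in pos: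
--         out[i] = "a"
--     digits = [0] * len(pos)
--     while True:
--         yield ''.join(out)
--         # odometer: advance the rightmost digit, carrying leftwards
--         j = len(pos) - 1
--         while j >= 0 and digits[j] == 4:
--             digits[j] = 0
--             out[pos[j]] = "a"
--             j -= 1
--         if j < 0:
--             return
--         digits[j] += 1
--         out[pos[j]] = vowels[digits[j]]
-- ===== Notes on version B (the rewrite author's own statement) =====
-- stated objective: alternative
-- what changed: B enumerates the variants with an in-place base-5 odometer: it collects the vowel positions once, keeps one mutable buffer plus a digit counter, and after each emitted string advances the counter with carry, touching only the positions whose digit changed - instead of rewriting positions to pools and expanding their Cartesian product with itertools.product.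
import Mathlib
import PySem

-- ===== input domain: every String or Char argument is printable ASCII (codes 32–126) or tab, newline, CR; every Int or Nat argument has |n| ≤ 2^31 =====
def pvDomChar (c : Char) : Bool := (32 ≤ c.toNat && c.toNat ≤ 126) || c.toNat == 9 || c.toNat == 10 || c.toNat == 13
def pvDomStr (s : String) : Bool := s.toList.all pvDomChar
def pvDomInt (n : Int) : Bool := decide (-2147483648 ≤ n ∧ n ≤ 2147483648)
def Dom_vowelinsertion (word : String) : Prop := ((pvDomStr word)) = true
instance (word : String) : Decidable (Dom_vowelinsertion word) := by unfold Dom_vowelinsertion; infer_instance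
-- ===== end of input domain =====

-- B's change (alternative, same cost): instead of expanding a Cartesian product of per-position pools,
-- B enumerates the variants with an in-place base-5 odometer over the precomputed vowel positions.


-- ===== PORT A =====
def pvVowels : List Char := ['a', 'e', 'i', 'o', 'u']

-- first pass of A: replace each vowel character by the whole vowel pool
def pvPools (w : List Char) : List (List Char) :=
  w.map (fun l => if pvVowels.contains l then pvVowels else [l])

-- itertools.product over the pools: leftmost position outermost, rightmost varies fastest
def pvProduct (pools : List (List Char)) : List (List Char) :=
  pools.foldl (fun acc cs => acc.flatMap (fun p => cs.map (fun c => p ++ [c]))) [[]]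

def vowelinsertion (word : String) : List String :=
  (pvProduct (pvPools word.toList)).map (fun p => String.mk p)

-- ===== PORT B =====
-- pos = [i for i, c in enumerate(out) if c in vowels]
def pvPositions (chars : List Char) : List Nat :=
  (chars.zipIdx.filter (fun p => pvVowels.contains p.1)).map (fun p => p.2)

-- B's inner while loop: carry leftwards from index j-1 (Lean's j is Python's j+1, so 0 means j < 0);
-- returns none when the odometer overflows (Python's `return`), else the advanced (digits, out)
def pvAdvance (pos : List Nat) : Nat → List Nat → List Char → Option (List Nat × List Char)
  | 0, _, _ => none
  | j + 1, digits, out =>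
    if digits.getD j 0 == 4 then
      pvAdvance pos j (digits.set j 0) (out.set (pos.getD j 0) 'a')
    else
      some (digits.set j (digits.getD j 0 + 1),
        out.set (pos.getD j 0) (pvVowels.getD (digits.getD j 0 + 1) ' '))

-- B's while True loop; the fuel 5 ^ pos.length only makes the recursion structural,
-- the loop still ends through pvAdvance returning none exactly as the Python returns
def pvLoop (pos : List Nat) : Nat → List Nat → List Char → List String
  | 0, _, _ => []
  | fuel + 1, digits, out =>
    String.mk out ::
      match pvAdvance pos pos.length digits out with
      | none => []
      | some (d, o) => pvLoop pos fuel d o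

def vowelinsertion_alt (word : String) : List String :=
  pvLoop (pvPositions word.toList) (5 ^ (pvPositions word.toList).length)
    (List.replicate (pvPositions word.toList).length 0)
    ((pvPositions word.toList).foldl (fun o i => o.set i 'a') word.toList)

-- ===== PRECONDITION & SPEC =====
def Spec_vowelinsertion (word : String) (out : List String) : Prop := out = vowelinsertion_alt word
instance (word : String) (out : List String) : Decidable (Spec_vowelinsertion word out) := by unfold Spec_vowelinsertion; infer_instance

-- ===== CLAIM (what is proved, stated in full; the proofs are below) =====
def Claim_equal_vowelinsertion : Prop := ∀ (word : String), Dom_vowelinsertion word → Spec_vowelinsertion word (vowelinsertion word)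

-- ===== LEMMAS AND PROOFS =====

-- right-recursive restatement of the Cartesian product
def pvProductR (pools : List (List Char)) : List (List Char) :=
  match pools with
  | [] => [[]]
  | cs :: rest => cs.flatMap (fun c => (pvProductR rest).map (fun q => c :: q))

-- reference decoder: substitute k's base-5 digits into the vowel positions, back to front
def pvStep (st : List Char × Nat) (i : Nat) : List Char × Nat :=
  (st.1.set i (pvVowels.getD (st.2 % 5) ' '), st.2 / 5)

def pvDecode (chars : List Char) (pos : List Nat) (k : Nat) : List Char :=
  (pos.reverse.foldl pvStep (chars, k)).1

-- big-endian base-5 digits of k, m of them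
def pvDigits (m k : Nat) : List Nat :=
  (List.range m).map (fun i => k / 5 ^ (m - 1 - i) % 5)

-- substitute an explicit digit list into the positions, back to front
def pvApplyDigits (chars : List Char) : List Nat → List Nat → List Char
  | [], _ => chars
  | _ :: _, [] => chars
  | p :: ps, d :: ds => (pvApplyDigits chars ps ds).set p (pvVowels.getD d ' ')

theorem pvProduct_foldl (pools : List (List Char)) (acc : List (List Char)) :
    pools.foldl (fun acc cs => acc.flatMap (fun p => cs.map (fun c => p ++ [c]))) acc
      = acc.flatMap (fun p => (pvProductR pools).map (fun q => p ++ q)) := by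
  induction pools generalizing acc with
  | nil => simp [pvProductR]
  | cons cs rest ih =>
    simp only [List.foldl_cons, ih, pvProductR]
    simp [List.flatMap_assoc, List.map_flatMap, List.flatMap_map, List.map_map,
      Function.comp_def, List.append_assoc]

-- the second component of the decode fold only counts divisions by 5
theorem pvStep_fold_snd (l : List Nat) (c : List Char) (r : Nat) :
    (l.foldl pvStep (c, r)).2 = r / 5 ^ l.length := by
  induction l generalizing c r with
  | nil => simp
  | cons i l ih =>
    simp only [List.foldl_cons, ih, pvStep, List.length_cons]
    rw [Nat.div_div_eq_div_mul, pow_succ, mul_comm 5]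

-- peel the head (most significant digit) of the position list
theorem pvDecode_cons (chars : List Char) (p : Nat) (ps : List Nat) (k : Nat) :
    pvDecode chars (p :: ps) k
      = (pvDecode chars ps k).set p (pvVowels.getD (k / 5 ^ ps.length % 5) ' ') := by
  unfold pvDecode
  rw [List.reverse_cons, List.foldl_append]
  simp only [List.foldl_cons, List.foldl_nil, pvStep]
  rw [pvStep_fold_snd, List.length_reverse]

-- shifting every position by one skips the head character
theorem pvStep_fold_map_succ (l : List Nat) (c : Char) (tl : List Char) (k : Nat) :
    (l.map (· + 1)).foldl pvStep (c :: tl, k)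
      = (c :: (l.foldl pvStep (tl, k)).1, (l.foldl pvStep (tl, k)).2) := by
  induction l generalizing tl k with
  | nil => simp
  | cons i l ih => simp [pvStep, ih, List.set]

theorem pvDecode_map_succ (qs : List Nat) (c : Char) (tl : List Char) (k : Nat) :
    pvDecode (c :: tl) (qs.map (· + 1)) k = c :: pvDecode tl qs k := by
  unfold pvDecode
  rw [← List.map_reverse, pvStep_fold_map_succ]

-- the vowel positions of a cons
theorem pvPositions_cons (c : Char) (rest : List Char) :
    pvPositions (c :: rest)
      = if pvVowels.contains c then 0 :: (pvPositions rest).map (· + 1)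
        else (pvPositions rest).map (· + 1) := by
  unfold pvPositions
  rw [List.zipIdx_cons, show (1 : Nat) = 0 + 1 from rfl, List.zipIdx_succ]
  simp only [List.filter_cons, List.filter_map, List.map_map, Function.comp_def]
  split <;> simp

-- splitting range (a * N) into outer digit and remainder
theorem pvRange_mul (a N : Nat) (f : Nat → List Char) :
    (List.range (a * N)).map f
      = (List.range a).flatMap (fun i => (List.range N).map (fun j => f (i * N + j))) := by
  induction a with
  | zero => simp
  | succ a ih =>
    rw [Nat.succ_mul, List.range_add, List.map_append, ih, List.range_succ]
    simp [List.map_map, Function.comp_def, Nat.add_comm]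

-- decoding an arithmetic block reproduces the Cartesian product
theorem pvDecode_range (chars : List Char) :
    ∀ d : Nat,
      (List.range (5 ^ (pvPositions chars).length)).map
          (fun j => pvDecode chars (pvPositions chars) (d * 5 ^ (pvPositions chars).length + j))
        = pvProductR (pvPools chars) := by
  induction chars with
  | nil =>
    intro d
    simp [pvPositions, pvPools, pvProductR, pvDecode]
  | cons c rest ih =>
    intro d
    have hpools : pvPools (c :: rest)
        = (if pvVowels.contains c then pvVowels else [c]) :: pvPools rest := by
      simp [pvPools]
    rw [pvPositions_cons, hpools]
    by_cases h : pvVowels.contains c = true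
    · -- vowel position: outer digit chooses the vowel, remainder recurses
      simp only [h, if_true]
      have hlen : (0 :: (pvPositions rest).map (· + 1)).length
          = (pvPositions rest).length + 1 := by simp
      rw [hlen]
      have key : ∀ i : Nat, i < 5 →
          (List.range (5 ^ (pvPositions rest).length)).map
              (fun j => pvDecode (c :: rest) (0 :: (pvPositions rest).map (· + 1))
                (d * 5 ^ ((pvPositions rest).length + 1) + (i * 5 ^ (pvPositions rest).length + j)))
            = (pvProductR (pvPools rest)).map (fun q => pvVowels.getD i ' ' :: q) := by
        intro i hi
        rw [← ih (5 * d + i), List.map_map]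
        apply List.map_congr_left
        intro j hj
        rw [List.mem_range] at hj
        rw [pvDecode_cons, pvDecode_map_succ]
        have hK : d * 5 ^ ((pvPositions rest).length + 1)
            + (i * 5 ^ (pvPositions rest).length + j)
            = 5 ^ (pvPositions rest).length * (5 * d + i) + j := by ring
        have hq : ((pvPositions rest).map (· + 1)).length = (pvPositions rest).length := by simp
        rw [hq, hK, Nat.mul_add_div (Nat.pow_pos (by norm_num)),
          Nat.div_eq_of_lt hj, Nat.add_zero, Nat.add_comm (5 * d) i,
          Nat.add_mul_mod_self_left, Nat.mod_eq_of_lt hi]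
        simp [List.set, Nat.mul_comm]
      rw [show (5 : Nat) ^ ((pvPositions rest).length + 1)
            = 5 * 5 ^ (pvPositions rest).length from by ring, pvRange_mul,
        show List.range 5 = [0, 1, 2, 3, 4] from rfl]
      simp only [List.flatMap_cons, List.flatMap_nil, List.append_nil]
      rw [show (5 : Nat) * 5 ^ (pvPositions rest).length
            = 5 ^ ((pvPositions rest).length + 1) from by ring]
      rw [key 0 (by norm_num), key 1 (by norm_num), key 2 (by norm_num),
        key 3 (by norm_num), key 4 (by norm_num)]
      simp [pvProductR, pvVowels]
    · -- consonant: the character is copied through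
      simp only [h, Bool.false_eq_true, if_false]
      have hq : ((pvPositions rest).map (· + 1)).length = (pvPositions rest).length := by simp
      rw [hq]
      have : ∀ j : Nat,
          pvDecode (c :: rest) ((pvPositions rest).map (· + 1))
              (d * 5 ^ (pvPositions rest).length + j)
            = c :: pvDecode rest (pvPositions rest)
                (d * 5 ^ (pvPositions rest).length + j) := by
        intro j; rw [pvDecode_map_succ]
      simp only [this]
      rw [show (List.range (5 ^ (pvPositions rest).length)).map
            (fun j => c :: pvDecode rest (pvPositions rest)
              (d * 5 ^ (pvPositions rest).length + j))
          = ((List.range (5 ^ (pvPositions rest).length)).map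
              (fun j => pvDecode rest (pvPositions rest)
                (d * 5 ^ (pvPositions rest).length + j))).map (fun q => c :: q)
          from by rw [List.map_map]; rfl]
      rw [ih d]
      simp [pvProductR]

-- ===== the odometer agrees with the decoder =====

theorem pvDigits_succ (m k : Nat) :
    pvDigits (m + 1) k = (k / 5 ^ m % 5) :: pvDigits m k := by
  unfold pvDigits
  rw [List.range_succ_eq_map]
  simp only [List.map_cons, List.map_map, Function.comp_def]
  refine congrArg₂ (· :: ·) (by norm_num) ?_
  apply List.map_congr_left
  intro a _
  have : m + 1 - 1 - a.succ = m - 1 - a := by omega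
  rw [this]

theorem pvDecode_eq_apply (chars : List Char) (pos : List Nat) (k : Nat) :
    pvDecode chars pos k = pvApplyDigits chars pos (pvDigits pos.length k) := by
  induction pos with
  | nil => simp [pvDecode, pvApplyDigits]
  | cons p ps ih =>
    rw [pvDecode_cons, ih, List.length_cons, pvDigits_succ]
    rfl

theorem pvDigits_length (m k : Nat) : (pvDigits m k).length = m := by
  simp [pvDigits]

theorem pvDigits_getD (m k j : Nat) (hj : j < m) :
    (pvDigits m k).getD j 0 = k / 5 ^ (m - 1 - j) % 5 := by
  simp [pvDigits, List.getD_eq_getElem?_getD, hj]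

-- arithmetic of one digit update (e is the exponent of the touched digit)
theorem pvDigSubAt (e K : Nat) (h0 : K % 5 ^ e = 0) (h4 : K / 5 ^ e % 5 = 4) :
    (K - 4 * 5 ^ e) / 5 ^ e % 5 = 0 := by
  obtain ⟨q, rfl⟩ : ∃ q, K = 5 ^ e * q :=
    ⟨K / 5 ^ e, (Nat.mul_div_cancel' (Nat.dvd_of_mod_eq_zero h0)).symm⟩
  rw [Nat.mul_div_cancel_left _ (Nat.pow_pos (by norm_num))] at h4
  have hq : 4 ≤ q := by omega
  rw [show 5 ^ e * q - 4 * 5 ^ e = 5 ^ e * (q - 4) from by rw [Nat.mul_sub]; ring_nf,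
    Nat.mul_div_cancel_left _ (Nat.pow_pos (by norm_num))]
  omega

theorem pvDigSubNe (e f K : Nat) (h0 : K % 5 ^ e = 0) (h4 : K / 5 ^ e % 5 = 4) (hne : f ≠ e) :
    (K - 4 * 5 ^ e) / 5 ^ f % 5 = K / 5 ^ f % 5 := by
  obtain ⟨q, rfl⟩ : ∃ q, K = 5 ^ e * q :=
    ⟨K / 5 ^ e, (Nat.mul_div_cancel' (Nat.dvd_of_mod_eq_zero h0)).symm⟩
  rw [Nat.mul_div_cancel_left _ (Nat.pow_pos (by norm_num))] at h4
  have hq : 4 ≤ q := by omega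
  have hsub : 5 ^ e * q - 4 * 5 ^ e = 5 ^ e * (q - 4) := by rw [Nat.mul_sub]; ring_nf
  rcases Nat.lt_or_gt_of_ne hne with hf | hf
  · -- f < e : both digits are 0
    have he : 5 ^ e = 5 ^ f * (5 ^ (e - f - 1) * 5) := by
      rw [← pow_succ, ← pow_add]
      congr 1
      omega
    have l1 : ∀ x : Nat, 5 ^ e * x / 5 ^ f % 5 = 0 := by
      intro x
      rw [he, Nat.mul_assoc, Nat.mul_div_cancel_left _ (Nat.pow_pos (by norm_num)),
        Nat.mul_assoc, Nat.mul_comm (5 ^ (e - f - 1)), Nat.mul_assoc, Nat.mul_mod_right]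
    rw [hsub, l1, l1]
  · -- e < f : no borrow above the touched digit
    have he : 5 ^ f = 5 ^ e * (5 * 5 ^ (f - e - 1)) := by
      rw [← pow_succ', ← pow_add]
      congr 1
      omega
    have l2 : ∀ x : Nat, 5 ^ e * x / 5 ^ f = x / 5 / 5 ^ (f - e - 1) := by
      intro x
      rw [he, Nat.mul_div_mul_left _ _ (Nat.pow_pos (by norm_num)),
        ← Nat.div_div_eq_div_mul]
    rw [hsub, l2, l2, show (q - 4) / 5 = q / 5 from by omega]

theorem pvDigAddAt (e K : Nat) (h0 : K % 5 ^ e = 0) (hlt : K / 5 ^ e % 5 < 4) :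
    (K + 5 ^ e) / 5 ^ e % 5 = K / 5 ^ e % 5 + 1 := by
  obtain ⟨q, rfl⟩ : ∃ q, K = 5 ^ e * q :=
    ⟨K / 5 ^ e, (Nat.mul_div_cancel' (Nat.dvd_of_mod_eq_zero h0)).symm⟩
  rw [Nat.mul_div_cancel_left _ (Nat.pow_pos (by norm_num))] at hlt ⊢
  rw [show 5 ^ e * q + 5 ^ e = 5 ^ e * (q + 1) from by ring,
    Nat.mul_div_cancel_left _ (Nat.pow_pos (by norm_num))]
  omega

theorem pvDigAddNe (e f K : Nat) (h0 : K % 5 ^ e = 0) (hlt : K / 5 ^ e % 5 < 4) (hne : f ≠ e) :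
    (K + 5 ^ e) / 5 ^ f % 5 = K / 5 ^ f % 5 := by
  obtain ⟨q, rfl⟩ : ∃ q, K = 5 ^ e * q :=
    ⟨K / 5 ^ e, (Nat.mul_div_cancel' (Nat.dvd_of_mod_eq_zero h0)).symm⟩
  rw [Nat.mul_div_cancel_left _ (Nat.pow_pos (by norm_num))] at hlt
  have hadd : 5 ^ e * q + 5 ^ e = 5 ^ e * (q + 1) := by ring
  rcases Nat.lt_or_gt_of_ne hne with hf | hf
  · have he : 5 ^ e = 5 ^ f * (5 ^ (e - f - 1) * 5) := by
      rw [← pow_succ, ← pow_add]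
      congr 1
      omega
    have l1 : ∀ x : Nat, 5 ^ e * x / 5 ^ f % 5 = 0 := by
      intro x
      rw [he, Nat.mul_assoc, Nat.mul_div_cancel_left _ (Nat.pow_pos (by norm_num)),
        Nat.mul_assoc, Nat.mul_comm (5 ^ (e - f - 1)), Nat.mul_assoc, Nat.mul_mod_right]
    rw [hadd, l1, l1]
  · have he : 5 ^ f = 5 ^ e * (5 * 5 ^ (f - e - 1)) := by
      rw [← pow_succ', ← pow_add]
      congr 1
      omega
    have l2 : ∀ x : Nat, 5 ^ e * x / 5 ^ f = x / 5 / 5 ^ (f - e - 1) := by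
      intro x
      rw [he, Nat.mul_div_mul_left _ _ (Nat.pow_pos (by norm_num)),
        ← Nat.div_div_eq_div_mul]
    rw [hadd, l2, l2, show (q + 1) / 5 = q / 5 from by omega]

theorem pvDigits_set_sub (m j K : Nat) (hj : j < m)
    (h0 : K % 5 ^ (m - 1 - j) = 0) (h4 : K / 5 ^ (m - 1 - j) % 5 = 4) :
    (pvDigits m K).set j 0 = pvDigits m (K - 4 * 5 ^ (m - 1 - j)) := by
  apply List.ext_getElem (by simp [pvDigits])
  intro i h1 h2
  simp only [pvDigits, List.getElem_set, List.getElem_map, List.getElem_range] at *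
  by_cases hij : j = i
  · subst hij
    simp [pvDigSubAt _ _ h0 h4]
  · have hm : i < m := by simpa [pvDigits] using h2
    rw [if_neg hij, pvDigSubNe _ _ _ h0 h4 (by omega)]

theorem pvDigits_set_add (m j K : Nat) (hj : j < m)
    (h0 : K % 5 ^ (m - 1 - j) = 0) (hlt : K / 5 ^ (m - 1 - j) % 5 < 4) :
    (pvDigits m K).set j (K / 5 ^ (m - 1 - j) % 5 + 1)
      = pvDigits m (K + 5 ^ (m - 1 - j)) := by
  apply List.ext_getElem (by simp [pvDigits])
  intro i h1 h2
  simp only [pvDigits, List.getElem_set, List.getElem_map, List.getElem_range] at *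
  by_cases hij : j = i
  · subst hij
    rw [if_pos rfl]
    exact (pvDigAddAt _ _ h0 hlt).symm
  · have hm : i < m := by simpa [pvDigits] using h2
    rw [if_neg hij, pvDigAddNe _ _ _ h0 hlt (by omega)]

-- setting a position not substituted by pvApplyDigits commutes outwards
theorem pvApply_set_out (chars : List Char) (ps : List Nat) (ds : List Nat)
    (x : Nat) (c : Char) (hx : x ∉ ps) :
    pvApplyDigits (chars.set x c) ps ds = (pvApplyDigits chars ps ds).set x c := by
  induction ps generalizing ds with
  | nil => simp [pvApplyDigits]
  | cons p qs ih =>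
    cases ds with
    | nil => simp [pvApplyDigits]
    | cons d ds =>
      simp only [pvApplyDigits]
      rw [ih _ (by simp at hx; exact hx.2), List.set_comm _ _ (by simp at hx; omega)]

-- substituting one digit is one set on the applied list
theorem pvApply_set (chars : List Char) (ps : List Nat) (ds : List Nat) (j v : Nat)
    (hj : j < ps.length) (hlen : ds.length = ps.length)
    (hp : ps.Pairwise (· < ·)) :
    pvApplyDigits chars ps (ds.set j v)
      = (pvApplyDigits chars ps ds).set (ps.getD j 0) (pvVowels.getD v ' ') := by
  induction ps generalizing ds j with
  | nil => simp at hj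
  | cons p qs ih =>
    cases ds with
    | nil => simp at hlen
    | cons d ds =>
      cases j with
      | zero =>
        simp only [List.set_cons_zero, pvApplyDigits, List.getD_cons_zero, List.set_set]
      | succ j =>
        simp only [List.set_cons_succ, pvApplyDigits, List.getD_cons_succ]
        rw [ih _ _ (by simpa using hj) (by simpa using hlen) (List.Pairwise.sublist (by simp) hp)]
        have hjq : j < qs.length := by simpa using hj
        have hmem : qs.getD j 0 ∈ qs := by
          rw [List.getD_eq_getElem _ _ hjq]
          exact List.getElem_mem hjq
        have hlt : p < qs.getD j 0 := (List.pairwise_cons.mp hp).1 _ hmem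
        rw [List.set_comm _ _ (by omega)]

-- the initial pass out[i] = 'a' for i in pos is pvApplyDigits with all digits 0
theorem pvFoldl_set_a (pos : List Nat) (hp : pos.Pairwise (· < ·)) :
    ∀ chars : List Char,
      pos.foldl (fun o i => o.set i 'a') chars
        = pvApplyDigits chars pos (List.replicate pos.length 0) := by
  induction pos with
  | nil => intro chars; simp [pvApplyDigits]
  | cons p ps ih =>
    intro chars
    simp only [List.foldl_cons, List.length_cons, List.replicate_succ, pvApplyDigits]
    rw [ih (List.Pairwise.sublist (by simp) hp) (chars.set p 'a'),
      pvApply_set_out _ _ _ _ _ ?_]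
    · rfl
    · intro hmem
      exact absurd ((List.pairwise_cons.mp hp).1 _ hmem) (by omega)

theorem pvDigits_zero (m : Nat) : pvDigits m 0 = List.replicate m 0 := by
  simp [pvDigits]

-- vowel positions are strictly increasing
theorem pvPositions_pairwise (chars : List Char) :
    (pvPositions chars).Pairwise (· < ·) := by
  unfold pvPositions
  have hsub : List.Sublist
      ((chars.zipIdx.filter (fun p => pvVowels.contains p.1)).map (fun p => p.2))
      (chars.zipIdx.map (fun p => p.2)) :=
    List.Sublist.map _ List.filter_sublist
  have hall : (chars.zipIdx.map (fun p => p.2)).Pairwise (· < ·) := by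
    rw [show (fun p : Char × Nat => p.2) = Prod.snd from rfl, List.zipIdx_map_snd]
    exact List.pairwise_lt_range' 1
  exact hall.sublist hsub

-- correctness of the carry loop: advancing from K adds 5 ^ (m - j), none on overflow
theorem pvAdvance_spec (chars : List Char) (pos : List Nat) (hp : pos.Pairwise (· < ·)) :
    ∀ j, j ≤ pos.length → ∀ K, K % 5 ^ (pos.length - j) = 0 →
      K + 5 ^ (pos.length - j) ≤ 5 ^ pos.length →
      pvAdvance pos j (pvDigits pos.length K)
          (pvApplyDigits chars pos (pvDigits pos.length K))
        = if K + 5 ^ (pos.length - j) = 5 ^ pos.length then none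
          else some (pvDigits pos.length (K + 5 ^ (pos.length - j)),
            pvApplyDigits chars pos (pvDigits pos.length (K + 5 ^ (pos.length - j)))) := by
  intro j
  induction j with
  | zero =>
    intro _ K h0 hle
    rw [Nat.sub_zero] at hle ⊢
    have hK : K = 0 := by omega
    subst hK
    rw [if_pos (by omega)]
    rfl
  | succ j ih =>
    intro hj1 K h0 hle
    have hjm : j < pos.length := by omega
    have he : pos.length - (j + 1) = pos.length - 1 - j := by omega
    rw [he] at h0 hle ⊢
    obtain ⟨q, hKq⟩ : ∃ q, K = 5 ^ (pos.length - 1 - j) * q :=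
      ⟨K / 5 ^ (pos.length - 1 - j), (Nat.mul_div_cancel' (Nat.dvd_of_mod_eq_zero h0)).symm⟩
    have hq : K / 5 ^ (pos.length - 1 - j) = q := by
      rw [hKq, Nat.mul_div_cancel_left _ (Nat.pow_pos (by norm_num))]
    have hpow : (5 : Nat) ^ (pos.length - j) = 5 ^ (pos.length - 1 - j) * 5 := by
      rw [← pow_succ]
      congr 1
      omega
    have hpowm : (5 : Nat) ^ pos.length
        = 5 ^ (pos.length - 1 - j) * 5 ^ (j + 1) := by
      rw [← pow_add]
      congr 1
      omega
    simp only [pvAdvance]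
    rw [pvDigits_getD _ _ _ hjm, hq]
    by_cases h4 : q % 5 = 4
    · -- carry: digit is 4, clear it and recurse
      rw [if_pos (by simp [h4])]
      have h4' : K / 5 ^ (pos.length - 1 - j) % 5 = 4 := by rw [hq]; exact h4
      rw [show ('a' : Char) = pvVowels.getD 0 ' ' from rfl,
        ← pvApply_set chars pos _ j 0 hjm (pvDigits_length _ _) hp,
        pvDigits_set_sub _ _ _ hjm h0 h4']
      have hsub : K - 4 * 5 ^ (pos.length - 1 - j)
          = 5 ^ (pos.length - 1 - j) * (q - 4) := by
        rw [hKq, Nat.mul_sub]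
        ring_nf
      have hmod : (K - 4 * 5 ^ (pos.length - 1 - j)) % 5 ^ (pos.length - j) = 0 := by
        rw [hsub, hpow, show q - 4 = 5 * (q / 5) from by omega,
          show 5 ^ (pos.length - 1 - j) * (5 * (q / 5))
            = 5 ^ (pos.length - 1 - j) * 5 * (q / 5) from by ring,
          Nat.mul_mod_right]
      have hstep : K - 4 * 5 ^ (pos.length - 1 - j) + 5 ^ (pos.length - j)
          = K + 5 ^ (pos.length - 1 - j) := by
        have hq4 : 4 ≤ q := by omega
        have : 4 * 5 ^ (pos.length - 1 - j) ≤ K := by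
          rw [hKq]
          calc 4 * 5 ^ (pos.length - 1 - j) = 5 ^ (pos.length - 1 - j) * 4 := by ring
            _ ≤ 5 ^ (pos.length - 1 - j) * q := Nat.mul_le_mul_left _ hq4
        omega
      rw [ih (by omega) _ hmod (by omega), hstep]
    · -- no carry: increment the digit and stop
      have hlt : q % 5 < 4 := by omega
      have hlt' : K / 5 ^ (pos.length - 1 - j) % 5 < 4 := by rw [hq]; exact hlt
      rw [if_neg (by simp [h4])]
      have hne : ¬ (K + 5 ^ (pos.length - 1 - j) = 5 ^ pos.length) := by
        intro hcontra
        rw [hKq, hpowm, show 5 ^ (pos.length - 1 - j) * q + 5 ^ (pos.length - 1 - j)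
            = 5 ^ (pos.length - 1 - j) * (q + 1) from by ring] at hcontra
        have hq1 : q + 1 = 5 ^ (j + 1) :=
          Nat.eq_of_mul_eq_mul_left (Nat.pow_pos (by norm_num)) hcontra
        rw [pow_succ] at hq1
        omega
      rw [if_neg hne, ← pvApply_set chars pos _ j (q % 5 + 1) hjm (pvDigits_length _ _) hp]
      have hset := pvDigits_set_add pos.length j K hjm h0 hlt'
      rw [hq] at hset
      rw [hset]

-- the emission loop enumerates the counter values in order
theorem pvLoop_spec (chars : List Char) (pos : List Nat) (hp : pos.Pairwise (· < ·)) :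
    ∀ fuel K, fuel = 5 ^ pos.length - K → K < 5 ^ pos.length →
      pvLoop pos fuel (pvDigits pos.length K)
          (pvApplyDigits chars pos (pvDigits pos.length K))
        = (List.range' K fuel).map
            (fun t => String.mk (pvApplyDigits chars pos (pvDigits pos.length t))) := by
  intro fuel
  induction fuel with
  | zero => intro K hfuel hK; omega
  | succ fuel ih =>
    intro K hfuel hK
    simp only [pvLoop]
    have hadv := pvAdvance_spec chars pos hp pos.length (Nat.le_refl _) K
    rw [Nat.sub_self, pow_zero] at hadv
    rw [hadv (Nat.mod_one K) (by omega)]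
    by_cases hend : K + 1 = 5 ^ pos.length
    · rw [if_pos hend]
      have : fuel = 0 := by omega
      subst this
      simp
    · rw [if_neg hend, List.range'_succ]
      simp only [List.map_cons]
      exact congrArg₂ (· :: ·) rfl (ih (K + 1) (by omega) (by omega))

-- ===== VERDICT (by name: the statement is the Claim_ definition above) =====
theorem vowelinsertion_spec : Claim_equal_vowelinsertion := by
  intro word _
  unfold Spec_vowelinsertion vowelinsertion vowelinsertion_alt pvProduct
  rw [pvProduct_foldl]
  have hp := pvPositions_pairwise word.toList
  rw [pvFoldl_set_a _ hp, ← pvDigits_zero,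
    pvLoop_spec word.toList _ hp _ 0 (by simp) (Nat.pow_pos (by norm_num))]
  have h := pvDecode_range word.toList 0
  simp only [Nat.zero_mul, Nat.zero_add] at h
  rw [← List.range_eq_range']
  simp only [← pvDecode_eq_apply]
  rw [← h]
  simp [List.map_map, Function.comp_def]
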